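-- pv_equiv track=rewrite | github.com/YoyinZyc/Leetcode_Python | Google/ARMove.py | ARMove
-- ===== SOURCE A (Python) =====
-- def ARMove(l,inispeed):
--     speed = inispeed
--     posi = 0
--     direction = True
--     for v in l:
--         if v == 'A':
--             if direction:
--                 posi += speed
--             else:
--                 posi -= speed
--             speed = speed << 1
--         else:
--             direction = not direction
--             speed = inispeed
--     return posi
-- ===== SOURCE B (Python) =====
-- def ARMove(l, inispeed):
--     # Closed form per run: a maximal run of k consecutive 'A's contributes
--     # sign * inispeed * (2**k - 1); each non-'A' command flips the sign and resets the run.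
--     posi = 0
--     sign = 1
--     run = 0
--     for v in l:
--         if v == 'A':
--             run += 1
--         else:
--             posi += sign * inispeed * (2 ** run - 1)
--             sign = -sign
--             run = 0
--     return posi + sign * inispeed * (2 ** run - 1)
-- ===== Notes on version B (the rewrite author's own statement) =====
-- stated objective: alternative
-- what changed: Replaces the per-step speed-doubling simulation (speed, position, direction state) with a run-length closed form: each maximal run of k consecutive 'A's adds sign*inispeed*(2**k-1), and each non-'A' flips the sign and resets the run.
import Mathlib
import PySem

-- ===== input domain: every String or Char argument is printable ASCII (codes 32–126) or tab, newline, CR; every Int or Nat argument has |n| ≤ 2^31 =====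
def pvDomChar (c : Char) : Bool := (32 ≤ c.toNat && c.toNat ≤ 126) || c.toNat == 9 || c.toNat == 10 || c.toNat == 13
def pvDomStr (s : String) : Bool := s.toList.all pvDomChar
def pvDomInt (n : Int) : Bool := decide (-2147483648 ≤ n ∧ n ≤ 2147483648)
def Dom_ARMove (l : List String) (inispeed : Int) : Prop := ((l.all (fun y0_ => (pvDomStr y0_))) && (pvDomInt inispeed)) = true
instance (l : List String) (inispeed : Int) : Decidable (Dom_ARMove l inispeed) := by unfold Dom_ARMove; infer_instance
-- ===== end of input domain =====

-- ===== PORT A =====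
-- loop over the commands carrying (speed, posi, direction), exactly as A's for-loop;
-- Python's `speed << 1` on int is exactly `speed * 2` (arithmetic shift, also for negatives)
def ARMoveLoop (inispeed : Int) : List String → Int → Int → Bool → Int
  | [], _, posi, _ => posi
  | v :: t, speed, posi, direction =>
    if v = "A" then
      ARMoveLoop inispeed t (speed * 2) (if direction then posi + speed else posi - speed) direction
    else
      ARMoveLoop inispeed t inispeed posi (!direction)

def ARMove (l : List String) (inispeed : Int) : Int :=
  ARMoveLoop inispeed l inispeed 0 true

-- ===== PORT B =====
-- B: run-length closed form; state (posi, sign, run), final run flushed at the end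
def ARMoveAltLoop (inispeed : Int) : List String → Int → Int → Nat → Int
  | [], posi, sign, run => posi + sign * inispeed * (2 ^ run - 1)
  | v :: t, posi, sign, run =>
    if v = "A" then
      ARMoveAltLoop inispeed t posi sign (run + 1)
    else
      ARMoveAltLoop inispeed t (posi + sign * inispeed * (2 ^ run - 1)) (-sign) 0

def ARMove_alt (l : List String) (inispeed : Int) : Int :=
  ARMoveAltLoop inispeed l 0 1 0

-- ===== PRECONDITION & SPEC =====
def Spec_ARMove (l : List String) (inispeed : Int) (out : Int) : Prop := out = ARMove_alt l inispeed
instance (l : List String) (inispeed : Int) (out : Int) : Decidable (Spec_ARMove l inispeed out) := by unfold Spec_ARMove; infer_instance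

-- ===== CLAIM (what is proved, stated in full; the proofs are below) =====
def Claim_equal_ARMove : Prop := ∀ (l : List String) (inispeed : Int), Dom_ARMove l inispeed → Spec_ARMove l inispeed (ARMove l inispeed)

-- ===== LEMMAS AND PROOFS =====

-- ===== VERDICT (by name: the statement is the Claim_ definition above) =====
theorem ARMove_loops (inispeed : Int) (l : List String) :
    ∀ (posi sign : Int) (run : Nat), (sign = 1 ∨ sign = -1) →
    ARMoveLoop inispeed l (inispeed * 2 ^ run) (posi + sign * inispeed * (2 ^ run - 1))
      (decide (sign = 1))
      = ARMoveAltLoop inispeed l posi sign run := by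
  induction l with
  | nil => intro posi sign run _; simp [ARMoveLoop, ARMoveAltLoop]
  | cons v t ih =>
    intro posi sign run hs
    by_cases hv : v = "A"
    · rw [ARMoveLoop, ARMoveAltLoop, if_pos hv, if_pos hv]
      have key : (if decide (sign = 1) = true then
            posi + sign * inispeed * (2 ^ run - 1) + inispeed * 2 ^ run
          else posi + sign * inispeed * (2 ^ run - 1) - inispeed * 2 ^ run)
          = posi + sign * inispeed * (2 ^ (run + 1) - 1) := by
        rcases hs with h | h <;> subst h <;> simp <;> ring
      rw [key, show inispeed * 2 ^ run * 2 = inispeed * 2 ^ (run + 1) by ring]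
      exact ih posi sign (run + 1) hs
    · rw [ARMoveLoop, ARMoveAltLoop, if_neg hv, if_neg hv]
      have h1 : (!decide (sign = 1)) = decide (-sign = 1) := by
        rcases hs with h | h <;> subst h <;> decide
      have h2 : posi + sign * inispeed * (2 ^ run - 1)
          = (posi + sign * inispeed * (2 ^ run - 1)) + (-sign) * inispeed * (2 ^ (0:Nat) - 1) := by
        ring
      have h3 : inispeed = inispeed * 2 ^ (0:Nat) := by ring
      rw [h1]
      calc ARMoveLoop inispeed t inispeed (posi + sign * inispeed * (2 ^ run - 1)) (decide (-sign = 1))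
          = ARMoveLoop inispeed t (inispeed * 2 ^ (0:Nat))
              ((posi + sign * inispeed * (2 ^ run - 1)) + (-sign) * inispeed * (2 ^ (0:Nat) - 1))
              (decide (-sign = 1)) := by rw [← h2, ← h3]
        _ = ARMoveAltLoop inispeed t (posi + sign * inispeed * (2 ^ run - 1)) (-sign) 0 := by
              apply ih
              rcases hs with h | h <;> subst h <;> simp

theorem ARMove_spec : Claim_equal_ARMove := by
  intro l inispeed _
  unfold Spec_ARMove ARMove ARMove_alt
  have := ARMove_loops inispeed l 0 1 0 (Or.inl rfl)
  simpa using this
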